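-- pv_equiv track=rewrite | github.com/Adr-oc/proyecto-01-Adrocodrilo | calculadora.py | contar_parentesis
-- ===== SOURCE A (Python) =====
-- def contar_parentesis(expresion, tipo): #funcion para contar los parentesis
--     parentesis = 0
--
--     if tipo == "abiertos": #cuenta los parentesis abiertos
--         parentesis_type = "("
--         i = 0
--         while i < len(expresion):
--             if expresion[i] == parentesis_type:
--                 parentesis += 1
--                 while i+1 < len(expresion) and expresion[i+1] == parentesis_type:
--                     i += 1
--             i += 1
--
--     if tipo == "cerrados": #cuenta los parentesis cerrados
--         parentesis_type = ")"
--         i = len(expresion) - 1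
--         while i >= 0:
--             if expresion[i] == parentesis_type:
--                 parentesis += 1
--                 while i-1 >= 0 and expresion[i-1] == parentesis_type:
--                     i -= 1
--             i -= 1
--
--     return parentesis
-- ===== SOURCE B (Python) =====
-- def contar_parentesis(expresion, tipo):
--     if tipo == "abiertos":
--         objetivo = "("
--     elif tipo == "cerrados":
--         objetivo = ")"
--     else:
--         return 0
--     total = 0
--     prev = ""
--     for ch in expresion:
--         if ch == objetivo and prev != objetivo:
--             total += 1
--         prev = ch
--     return total
-- ===== Notes on version B (the rewrite author's own statement) =====
-- stated objective: simpler
-- what changed: Replaces A's two direction-specific while-loops with index-skipping inner loops (and a backward scan for 'cerrados') by one forward pass that counts run starts via a previous-character comparison.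
import Mathlib
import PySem

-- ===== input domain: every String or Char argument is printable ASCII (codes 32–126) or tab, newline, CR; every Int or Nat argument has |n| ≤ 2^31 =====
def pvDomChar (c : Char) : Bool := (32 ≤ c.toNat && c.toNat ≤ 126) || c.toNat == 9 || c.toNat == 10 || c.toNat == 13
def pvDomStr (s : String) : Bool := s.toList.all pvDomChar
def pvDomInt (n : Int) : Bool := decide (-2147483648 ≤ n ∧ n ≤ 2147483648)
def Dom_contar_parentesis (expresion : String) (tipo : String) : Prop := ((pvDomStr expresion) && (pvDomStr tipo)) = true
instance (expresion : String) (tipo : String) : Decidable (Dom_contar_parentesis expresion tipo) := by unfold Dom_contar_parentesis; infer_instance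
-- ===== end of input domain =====

-- B replaces A's two direction-specific index-skipping while-loops by one forward
-- run-start-counting pass (objective: simpler).


-- ===== PORT A =====
-- Forward while-loop of the "abiertos" branch: on a '(', count 1 and the inner
-- while advances past the rest of the run (dropWhile); otherwise step one char.
def cuentaAdelante : List Char → Int
  | [] => 0
  | x :: xs =>
    if x = '(' then 1 + cuentaAdelante (xs.dropWhile (· = '(')) else cuentaAdelante xs
termination_by l => l.length
decreasing_by
  · exact Nat.lt_succ_of_le (List.length_dropWhile_le _ _)
  · simp

-- Backward while-loop of the "cerrados" branch, expressed as the same scan over the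
-- reversed list (i runs from len-1 down to 0; the inner while skips the run).
def cuentaAtras : List Char → Int
  | [] => 0
  | x :: xs =>
    if x = ')' then 1 + cuentaAtras (xs.dropWhile (· = ')')) else cuentaAtras xs
termination_by l => l.length
decreasing_by
  · exact Nat.lt_succ_of_le (List.length_dropWhile_le _ _)
  · simp

def contar_parentesis (expresion : String) (tipo : String) : Int :=
  let parentesis : Int := 0
  let parentesis :=
    if tipo = "abiertos" then parentesis + cuentaAdelante expresion.toList else parentesis
  let parentesis :=
    if tipo = "cerrados" then parentesis + cuentaAtras expresion.toList.reverse else parentesis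
  parentesis

-- ===== PORT B =====
-- One forward pass; `prev` records whether the previous character was the target.
def runStarts (c : Char) : List Char → Bool → Int
  | [], _ => 0
  | x :: xs, prev => (if x = c ∧ ¬prev then 1 else 0) + runStarts c xs (x == c)

def contar_parentesis_alt (expresion : String) (tipo : String) : Int :=
  if tipo = "abiertos" then runStarts '(' expresion.toList false
  else if tipo = "cerrados" then runStarts ')' expresion.toList false
  else 0

-- ===== PRECONDITION & SPEC =====
def Spec_contar_parentesis (expresion : String) (tipo : String) (out : Int) : Prop := out = contar_parentesis_alt expresion tipo
instance (expresion : String) (tipo : String) (out : Int) : Decidable (Spec_contar_parentesis expresion tipo out) := by unfold Spec_contar_parentesis; infer_instance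

-- ===== CLAIM (what is proved, stated in full; the proofs are below) =====
def Claim_equal_contar_parentesis : Prop := ∀ (expresion : String) (tipo : String), Dom_contar_parentesis expresion tipo → Spec_contar_parentesis expresion tipo (contar_parentesis expresion tipo)

-- ===== LEMMAS AND PROOFS =====

-- Skipping the rest of a run with prev = true is the same as restarting after it.
theorem runStarts_dropWhile (c : Char) (l : List Char) :
    runStarts c l true = runStarts c (l.dropWhile (· = c)) false := by
  induction l with
  | nil => rfl
  | cons y ys ih =>
    by_cases h : y = c
    · simp [runStarts, h, List.dropWhile, ih]
    · simp [runStarts, h, List.dropWhile]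

theorem cuentaAdelante_eq (l : List Char) :
    cuentaAdelante l = runStarts '(' l false := by
  induction l using cuentaAdelante.induct with
  | case1 => simp [cuentaAdelante, runStarts]
  | case2 xs ih => simp [cuentaAdelante, runStarts, runStarts_dropWhile, ih]
  | case3 x xs h ih =>
    have hb : (x == '(') = false := by simp [h]
    simp [cuentaAdelante, runStarts, h, ih, hb]

theorem cuentaAtras_eq (l : List Char) :
    cuentaAtras l = runStarts ')' l false := by
  induction l using cuentaAtras.induct with
  | case1 => simp [cuentaAtras, runStarts]
  | case2 xs ih => simp [cuentaAtras, runStarts, runStarts_dropWhile, ih]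
  | case3 x xs h ih =>
    have hb : (x == ')') = false := by simp [h]
    simp [cuentaAtras, runStarts, h, ih, hb]

-- the `prev` flag after scanning m starting from prev
def endFlag (c : Char) (prev : Bool) (m : List Char) : Bool :=
  match m.getLast? with
  | some y => y == c
  | none => prev

theorem runStarts_snoc (c : Char) (m : List Char) (x : Char) (prev : Bool) :
    runStarts c (m ++ [x]) prev
      = runStarts c m prev + (if x = c ∧ ¬endFlag c prev m then 1 else 0) := by
  induction m generalizing prev with
  | nil => simp [runStarts, endFlag]
  | cons z zs ih =>
    simp only [List.cons_append, runStarts, ih]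
    have : endFlag c (z == c) zs = endFlag c prev (z :: zs) := by
      cases zs with
      | nil => simp [endFlag]
      | cons w ws =>
        cases hg : (w :: ws).getLast? with
        | none => simp at hg
        | some y => simp [endFlag, hg]
    rw [this]; ring

-- the number of maximal runs is invariant under reversal
theorem runStarts_reverse (c : Char) (l : List Char) :
    runStarts c l.reverse false = runStarts c l false := by
  induction l with
  | nil => rfl
  | cons x xs ih =>
    rw [List.reverse_cons, runStarts_snoc, ih]
    have hflag : endFlag c false xs.reverse
        = (match xs with | [] => false | y :: _ => (y == c)) := by
      cases xs with
      | nil => rfl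
      | cons y ys => simp [endFlag, List.getLast?_reverse]
    rw [hflag]
    by_cases hx : x = c
    · cases xs with
      | nil => simp [runStarts, hx]
      | cons y ys =>
        by_cases hy : y = c
        · simp [runStarts, hx, hy]
        · simp [runStarts, hx, hy]; ring
    · cases xs with
      | nil => simp [runStarts, hx]
      | cons y ys => simp [runStarts, hx]

-- ===== VERDICT (by name: the statement is the Claim_ definition above) =====
theorem contar_parentesis_spec : Claim_equal_contar_parentesis := by
  intro expresion tipo _
  unfold Spec_contar_parentesis contar_parentesis contar_parentesis_alt
  by_cases h1 : tipo = "abiertos"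
  · have h2 : tipo ≠ "cerrados" := by simp [h1]
    simp [h1, cuentaAdelante_eq]
  · by_cases h2 : tipo = "cerrados"
    · simp [h2, cuentaAtras_eq, runStarts_reverse]
    · simp [h1, h2]
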